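-- pv_equiv track=rewrite | github.com/skvcool-rgb/KOS-Organism | kos/grid_primitives.py | rotate_quadrants
-- ===== SOURCE A (Python) =====
-- from typing import Any, Callable, Dict, List, Tuple
--
-- Grid = List[List[int]]
--
-- def rotate_quadrants(g: Grid) -> Grid:
--     """Rotate four quadrants of the grid clockwise."""
--     if not g or not g[0]: return g
--     rows, cols = len(g), len(g[0])
--     if rows % 2 != 0 or cols % 2 != 0: return g
--     hr, hc = rows // 2, cols // 2
--     # TL->TR, TR->BR, BR->BL, BL->TL
--     result = [row[:] for row in g]
--     for i in range(hr):
--         for j in range(hc):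
--             result[i][j+hc] = g[i][j]           # TL -> TR
--             result[i+hr][j+hc] = g[i][j+hc]     # TR -> BR
--             result[i+hr][j] = g[i+hr][j+hc]     # BR -> BL
--             result[i][j] = g[i+hr][j]            # BL -> TL
--     return result
-- ===== SOURCE B (Python) =====
-- def rotate_quadrants(g):
--     """Rotate four quadrants of the grid clockwise by block concatenation of row halves."""
--     if not g or not g[0]:
--         return g
--     rows, cols = len(g), len(g[0])
--     if rows % 2 != 0 or cols % 2 != 0:
--         return g
--     hr, hc = rows // 2, cols // 2
--     # top rows: BL half then TL half; bottom rows: BR half then TR half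
--     top = [g[i + hr][:hc] + g[i][:hc] for i in range(hr)]
--     bot = [g[i + hr][hc:] + g[i][hc:] for i in range(hr)]
--     return top + bot
-- ===== Notes on version B (the rewrite author's own statement) =====
-- stated objective: simpler
-- what changed: Replaces A's copy-then-mutate nested per-cell loop (four index assignments per cell) with direct assembly of each output row as a concatenation of two quadrant row-half slices; Pre_ excludes ragged grids that reach the rotation (even dimensions but a row length differing from the first row's): shorter rows make A raise IndexError, and on longer rows A's keeping of cells past the declared width is an accident of its copy-then-mutate implementation.
-- outside the precondition, e.g. on rotate_quadrants([[1, 2], [3, 4, 5]]): A returns [[3, 1], [4, 2, 5]], B returns [[3, 1], [4, 5, 2]]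
import Mathlib
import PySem

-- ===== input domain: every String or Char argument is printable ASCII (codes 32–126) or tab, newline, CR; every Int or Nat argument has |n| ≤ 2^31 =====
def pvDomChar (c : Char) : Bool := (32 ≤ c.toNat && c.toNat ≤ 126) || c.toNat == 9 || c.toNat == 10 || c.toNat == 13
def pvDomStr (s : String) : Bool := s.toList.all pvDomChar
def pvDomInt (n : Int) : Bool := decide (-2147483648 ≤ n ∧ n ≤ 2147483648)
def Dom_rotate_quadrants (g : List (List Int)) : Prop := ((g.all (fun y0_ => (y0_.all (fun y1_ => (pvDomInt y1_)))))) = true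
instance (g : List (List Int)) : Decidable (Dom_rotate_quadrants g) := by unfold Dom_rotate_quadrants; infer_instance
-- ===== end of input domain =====

-- B assembles each output row by concatenating two quadrant row-half slices instead of
-- A's copy-then-mutate nested per-cell loop; objective: simpler.

-- ===== PORT A =====
-- g[i][j] read, exact for in-range indices; Pre_ excludes the out-of-range cases
def pvGet2 (g : List (List Int)) (i j : Nat) : Int := (g.getD i []).getD j 0

-- result[i][j] = v; in-range on Pre_ (Python raises out of range, excluded by Pre_)
def pvSetCell : List (List Int) → Nat → Nat → Int → List (List Int)
  | [], _, _, _ => []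
  | r :: rs, 0, j, v => r.set j v :: rs
  | r :: rs, i+1, j, v => r :: pvSetCell rs i j v

-- the four assignments of A's inner loop body, in order
def pvStep (g : List (List Int)) (hr hc i : Nat) (res : List (List Int)) (j : Nat) : List (List Int) :=
  let res1 := pvSetCell res i (j+hc) (pvGet2 g i j)            -- TL -> TR
  let res2 := pvSetCell res1 (i+hr) (j+hc) (pvGet2 g i (j+hc)) -- TR -> BR
  let res3 := pvSetCell res2 (i+hr) j (pvGet2 g (i+hr) (j+hc)) -- BR -> BL
  pvSetCell res3 i j (pvGet2 g (i+hr) j)                        -- BL -> TL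

def rotate_quadrants (g : List (List Int)) : List (List Int) :=
  if g.length = 0 ∨ (g.headD []).length = 0 then g
  else if g.length % 2 ≠ 0 ∨ (g.headD []).length % 2 ≠ 0 then g
  else
    -- rows = len(g), cols = len(g[0]), hr = rows // 2, hc = cols // 2, result = [row[:] for row in g]
    (List.range (g.length / 2)).foldl
      (fun res i => (List.range ((g.headD []).length / 2)).foldl
        (pvStep g (g.length / 2) ((g.headD []).length / 2) i) res)
      (g.map (fun row => row))

-- ===== PORT B =====
def pvTopRow (g : List (List Int)) (hr hc i : Nat) : List Int :=
  (g.getD (i+hr) []).take hc ++ (g.getD i []).take hc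

def pvBotRow (g : List (List Int)) (hr hc i : Nat) : List Int :=
  (g.getD (i+hr) []).drop hc ++ (g.getD i []).drop hc

def rotate_quadrants_alt (g : List (List Int)) : List (List Int) :=
  if g.length = 0 ∨ (g.headD []).length = 0 then g
  else if g.length % 2 ≠ 0 ∨ (g.headD []).length % 2 ≠ 0 then g
  else
    (List.range (g.length / 2)).map
        (pvTopRow g (g.length / 2) ((g.headD []).length / 2))
      ++ (List.range (g.length / 2)).map
        (pvBotRow g (g.length / 2) ((g.headD []).length / 2))

-- ===== PRECONDITION & SPEC =====
-- Pre_ excludes ragged grids that reach the rotation (even dimensions but some row length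
-- differing from the first row's): on a shorter row A raises IndexError, and on a longer
-- row A's keeping of the cells past the declared width is an accident of its
-- copy-then-mutate implementation.
def Pre_rotate_quadrants (g : List (List Int)) : Prop :=
  g = [] ∨ g.headD [] = [] ∨ g.length % 2 ≠ 0 ∨ (g.headD []).length % 2 ≠ 0 ∨
    ∀ r ∈ g, r.length = (g.headD []).length
instance (g : List (List Int)) : Decidable (Pre_rotate_quadrants g) := by
  unfold Pre_rotate_quadrants; infer_instance

def pvWitness_rotate_quadrants : List (List Int) := [[1, 2], [3, 4]]

def Spec_rotate_quadrants (g : List (List Int)) (out : List (List Int)) : Prop := out = rotate_quadrants_alt g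
instance (g : List (List Int)) (out : List (List Int)) : Decidable (Spec_rotate_quadrants g out) := by unfold Spec_rotate_quadrants; infer_instance

-- ===== CLAIM (what is proved, stated in full; the proofs are below) =====
def Claim_equal_rotate_quadrants : Prop := ∀ (g : List (List Int)), Dom_rotate_quadrants g → Pre_rotate_quadrants g → Spec_rotate_quadrants g (rotate_quadrants g)

-- ===== LEMMAS AND PROOFS =====

theorem pvSetCell_getElem? (m : List (List Int)) (i j : Nat) (v : Int) (k : Nat) :
    (pvSetCell m i j v)[k]? = if k = i then m[k]?.map (fun r => r.set j v) else m[k]? := by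
  induction m generalizing i k with
  | nil => simp [pvSetCell]
  | cons r rs ih =>
    cases i with
    | zero =>
      cases k with
      | zero => simp [pvSetCell]
      | succ k => simp [pvSetCell]
    | succ i =>
      cases k with
      | zero => simp [pvSetCell]
      | succ k => simpa [pvSetCell, Nat.succ_eq_add_one] using ih i k

-- one inner-loop iteration, seen row by row
theorem pvStep_getElem? (g : List (List Int)) (hr hc i j : Nat) (res : List (List Int))
    (hhr : hr ≠ 0) (k : Nat) :
    (pvStep g hr hc i res j)[k]? =
      if k = i then
        res[k]?.map (fun r => (r.set (j+hc) (pvGet2 g i j)).set j (pvGet2 g (i+hr) j))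
      else if k = i + hr then
        res[k]?.map (fun r => (r.set (j+hc) (pvGet2 g i (j+hc))).set j (pvGet2 g (i+hr) (j+hc)))
      else res[k]? := by
  have hne : ¬ i = i + hr := by omega
  have hne' : ¬ i + hr = i := by omega
  simp only [pvStep, pvSetCell_getElem?]
  by_cases hk : k = i
  · have hk2 : ¬ k = i + hr := by omega
    simp only [if_pos hk, if_neg hk2]
    cases res[k]? <;> rfl
  · by_cases hk2 : k = i + hr
    · simp only [if_neg hk, if_pos hk2]
      cases res[k]? <;> rfl
    · simp only [if_neg hk, if_neg hk2]

-- per-row action of a list of set-pairs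
def pvRowStep (a b : Nat → Int) (hc : Nat) (r : List Int) (j : Nat) : List Int :=
  (r.set (j+hc) (a j)).set j (b j)

-- the inner foldl acts independently on rows i and i+hr
theorem pvInner_getElem? (g : List (List Int)) (hr hc i : Nat) (hhr : hr ≠ 0)
    (l : List Nat) (res : List (List Int)) (k : Nat) :
    (l.foldl (pvStep g hr hc i) res)[k]? =
      if k = i then
        res[k]?.map (fun r => l.foldl (pvRowStep (fun j => pvGet2 g i j) (fun j => pvGet2 g (i+hr) j) hc) r)
      else if k = i + hr then
        res[k]?.map (fun r => l.foldl (pvRowStep (fun j => pvGet2 g i (j+hc)) (fun j => pvGet2 g (i+hr) (j+hc)) hc) r)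
      else res[k]? := by
  induction l generalizing res with
  | nil =>
    simp only [List.foldl_nil]
    split_ifs <;> (cases res[k]? <;> rfl)
  | cons j t ih =>
    simp only [List.foldl_cons]
    rw [ih (pvStep g hr hc i res j), pvStep_getElem? g hr hc i j res hhr]
    by_cases hk : k = i
    · have hk2 : ¬ k = i + hr := by omega
      simp only [if_pos hk, if_neg hk2]
      cases res[k]? <;> rfl
    · by_cases hk2 : k = i + hr
      · simp only [if_neg hk, if_pos hk2]
        cases res[k]? <;> rfl
      · simp only [if_neg hk, if_neg hk2]

-- the row action preserves length
theorem pvRowFold_length (a b : Nat → Int) (hc : Nat) (l : List Nat) :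
    ∀ r : List Int, (l.foldl (pvRowStep a b hc) r).length = r.length := by
  induction l with
  | nil => intro r; rfl
  | cons x t ih => intro r; rw [List.foldl_cons, ih]; simp [pvRowStep]

-- one full row rewritten by the inner loop, position by position
theorem pvRowFold_getElem? (a b : Nat → Int) (hc : Nat) (r : List Int)
    (hlen : 2 * hc ≤ r.length) (n : Nat) (hn : n ≤ hc) (p : Nat) :
    ((List.range n).foldl (pvRowStep a b hc) r)[p]? =
      if p < n then some (b p)
      else if hc ≤ p ∧ p < hc + n then some (a (p - hc))
      else r[p]? := by
  induction n with
  | zero => simp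
  | succ n ih =>
    have hlenf : ((List.range n).foldl (pvRowStep a b hc) r).length = r.length :=
      pvRowFold_length a b hc (List.range n) r
    rw [List.range_succ, List.foldl_append]
    simp only [List.foldl_cons, List.foldl_nil, pvRowStep]
    rw [List.getElem?_set, List.getElem?_set]
    simp only [List.length_set, hlenf]
    have ihn := ih (by omega)
    by_cases h1 : n = p
    · rw [if_pos h1, if_pos (show n < r.length by omega), if_pos (show p < n + 1 by omega), h1]
    · rw [if_neg h1]
      by_cases h2 : n + hc = p
      · rw [if_pos h2, if_pos (show n + hc < r.length by omega),
            if_neg (show ¬ p < n + 1 by omega),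
            if_pos (show hc ≤ p ∧ p < hc + (n + 1) by omega)]
        have e : p - hc = n := by omega
        rw [e]
      · rw [if_neg h2, ihn]
        by_cases hp1 : p < n
        · rw [if_pos hp1, if_pos (show p < n + 1 by omega)]
        · rw [if_neg hp1]
          by_cases hp2 : hc ≤ p ∧ p < hc + n
          · rw [if_pos hp2, if_neg (show ¬ p < n + 1 by omega),
                if_pos (show hc ≤ p ∧ p < hc + (n + 1) by omega)]
          · rw [if_neg hp2, if_neg (show ¬ p < n + 1 by omega),
                if_neg (show ¬ (hc ≤ p ∧ p < hc + (n + 1)) by omega)]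

-- the outer foldl, row by row
theorem pvOuter_getElem? (g : List (List Int)) (hr hc : Nat) (hhr : hr ≠ 0)
    (n : Nat) (hn : n ≤ hr) (k : Nat) :
    ((List.range n).foldl (fun res i => (List.range hc).foldl (pvStep g hr hc i) res) (g.map (fun row => row)))[k]? =
      if k < n then
        g[k]?.map (fun r => (List.range hc).foldl (pvRowStep (fun j => pvGet2 g k j) (fun j => pvGet2 g (k+hr) j) hc) r)
      else if hr ≤ k ∧ k < hr + n then
        g[k]?.map (fun r => (List.range hc).foldl (pvRowStep (fun j => pvGet2 g (k-hr) (j+hc)) (fun j => pvGet2 g k (j+hc)) hc) r)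
      else g[k]? := by
  induction n with
  | zero =>
    simp only [List.range_zero, List.foldl_nil]
    rw [if_neg (by omega), if_neg (by omega)]
    simp [List.map_id']
  | succ n ih =>
    rw [List.range_succ, List.foldl_append]
    simp only [List.foldl_cons, List.foldl_nil]
    rw [pvInner_getElem? g hr hc n hhr, ih (by omega)]
    by_cases hk : k = n
    · subst hk
      rw [if_pos rfl, if_neg (show ¬ k < k by omega),
          if_neg (show ¬ (hr ≤ k ∧ k < hr + k) by omega), if_pos (show k < k + 1 by omega)]
    · by_cases hk2 : k = n + hr
      · subst hk2
        rw [if_neg hk, if_pos rfl, if_neg (show ¬ n + hr < n by omega),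
            if_neg (show ¬ (hr ≤ n + hr ∧ n + hr < hr + n) by omega),
            if_neg (show ¬ n + hr < n + 1 by omega),
            if_pos (show hr ≤ n + hr ∧ n + hr < hr + (n + 1) by omega)]
        have e : n + hr - hr = n := by omega
        rw [e]
      · rw [if_neg hk, if_neg hk2]
        by_cases h1 : k < n
        · rw [if_pos h1, if_pos (show k < n + 1 by omega)]
        · rw [if_neg h1]
          by_cases h2 : hr ≤ k ∧ k < hr + n
          · rw [if_pos h2, if_neg (show ¬ k < n + 1 by omega),
                if_pos (show hr ≤ k ∧ k < hr + (n + 1) by omega)]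
          · rw [if_neg h2, if_neg (show ¬ k < n + 1 by omega),
                if_neg (show ¬ (hr ≤ k ∧ k < hr + (n + 1)) by omega)]

-- a fully rotated top row equals B's slice concatenation
theorem pvRowFold_top (g : List (List Int)) (hr hc i : Nat)
    (h0 : (g.getD i []).length = 2 * hc) (h1 : (g.getD (i+hr) []).length = 2 * hc) :
    (List.range hc).foldl (pvRowStep (fun j => pvGet2 g i j) (fun j => pvGet2 g (i+hr) j) hc) (g.getD i [])
      = pvTopRow g hr hc i := by
  apply List.ext_getElem?
  intro p
  rw [pvRowFold_getElem? _ _ hc _ (by omega) hc (le_refl hc) p]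
  unfold pvTopRow pvGet2
  have l1 : ((g.getD (i+hr) []).take hc).length = hc := by rw [List.length_take]; omega
  rw [List.getElem?_append, l1]
  by_cases hp : p < hc
  · rw [if_pos hp, if_pos hp, List.getElem?_take, if_pos hp,
        List.getD_eq_getElem _ _ (show p < (g.getD (i+hr) []).length by omega),
        List.getElem?_eq_getElem (show p < (g.getD (i+hr) []).length by omega)]
  · rw [if_neg hp, if_neg hp]
    by_cases hp2 : p < 2 * hc
    · rw [if_pos (show hc ≤ p ∧ p < hc + hc by omega),
          List.getElem?_take, if_pos (show p - hc < hc by omega),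
          List.getD_eq_getElem _ _ (show p - hc < (g.getD i []).length by omega),
          List.getElem?_eq_getElem (show p - hc < (g.getD i []).length by omega)]
    · rw [if_neg (show ¬ (hc ≤ p ∧ p < hc + hc) by omega),
          List.getElem?_eq_none (show (g.getD i []).length ≤ p by omega),
          List.getElem?_eq_none (show ((g.getD i []).take hc).length ≤ p - hc by
            rw [List.length_take]; omega)]

-- a fully rotated bottom row equals B's slice concatenation
theorem pvRowFold_bot (g : List (List Int)) (hr hc i : Nat)
    (h0 : (g.getD i []).length = 2 * hc) (h1 : (g.getD (i+hr) []).length = 2 * hc) :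
    (List.range hc).foldl (pvRowStep (fun j => pvGet2 g i (j+hc)) (fun j => pvGet2 g (i+hr) (j+hc)) hc) (g.getD (i+hr) [])
      = pvBotRow g hr hc i := by
  apply List.ext_getElem?
  intro p
  rw [pvRowFold_getElem? _ _ hc _ (by omega) hc (le_refl hc) p]
  unfold pvBotRow pvGet2
  have l1 : ((g.getD (i+hr) []).drop hc).length = hc := by rw [List.length_drop]; omega
  rw [List.getElem?_append, l1]
  by_cases hp : p < hc
  · rw [if_pos hp, if_pos hp, List.getElem?_drop, Nat.add_comm p hc,
        List.getD_eq_getElem _ _ (show hc + p < (g.getD (i+hr) []).length by omega),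
        List.getElem?_eq_getElem (show hc + p < (g.getD (i+hr) []).length by omega)]
  · rw [if_neg hp, if_neg hp]
    by_cases hp2 : p < 2 * hc
    · rw [if_pos (show hc ≤ p ∧ p < hc + hc by omega),
          List.getElem?_drop, show p - hc + hc = hc + (p - hc) by omega,
          List.getD_eq_getElem _ _ (show hc + (p - hc) < (g.getD i []).length by omega),
          List.getElem?_eq_getElem (show hc + (p - hc) < (g.getD i []).length by omega)]
    · rw [if_neg (show ¬ (hc ≤ p ∧ p < hc + hc) by omega),
          List.getElem?_eq_none (show (g.getD (i+hr) []).length ≤ p by omega),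
          List.getElem?_eq_none (show ((g.getD i []).drop hc).length ≤ p - hc by
            rw [List.length_drop]; omega)]

-- ===== VERDICT (by name: the statement is the Claim_ definition above) =====
theorem rotate_quadrants_spec : Claim_equal_rotate_quadrants := by
  intro g _hdom hpre
  unfold Spec_rotate_quadrants rotate_quadrants rotate_quadrants_alt
  by_cases h1 : g.length = 0 ∨ (g.headD []).length = 0
  · rw [if_pos h1, if_pos h1]
  · rw [if_neg h1, if_neg h1]
    by_cases h2 : g.length % 2 ≠ 0 ∨ (g.headD []).length % 2 ≠ 0
    · rw [if_pos h2, if_pos h2]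
    · rw [if_neg h2, if_neg h2]
      rw [not_or] at h1 h2
      obtain ⟨h1a, h1b⟩ := h1
      obtain ⟨h2a, h2b⟩ := h2
      -- Pre_ reduces to: every row exactly cols long
      have hrow : ∀ r ∈ g, r.length = (g.headD []).length := by
        rcases hpre with h | h | h | h | h
        · exact absurd (by rw [h]; rfl : g.length = 0) h1a
        · exact absurd (by rw [h]; rfl : (g.headD []).length = 0) h1b
        · exact absurd h h2a
        · exact absurd h h2b
        · exact h
      have hr2 : g.length = 2 * (g.length / 2) := by omega
      have hc2 : (g.headD []).length = 2 * ((g.headD []).length / 2) := by omega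
      have hhr : g.length / 2 ≠ 0 := by omega
      have hlen : ∀ k, k < g.length → (g.getD k []).length = 2 * ((g.headD []).length / 2) := by
        intro k hk
        have : g.getD k [] ∈ g := by
          rw [List.getD_eq_getElem g [] hk]; exact List.getElem_mem hk
        rw [hrow _ this]; omega
      apply List.ext_getElem?
      intro k
      rw [pvOuter_getElem? g (g.length / 2) ((g.headD []).length / 2) hhr (g.length / 2) (le_refl _) k]
      rw [List.getElem?_append]
      simp only [List.length_map, List.length_range, List.getElem?_map]
      by_cases hk : k < g.length / 2
      · rw [if_pos hk, if_pos hk, List.getElem?_range hk]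
        have hkr : k < g.length := by omega
        rw [List.getElem?_eq_getElem hkr]
        simp only [Option.map_some]
        have hgk : g[k] = g.getD k [] := (List.getD_eq_getElem g [] hkr).symm
        rw [hgk, pvRowFold_top g (g.length / 2) ((g.headD []).length / 2) k
              (hlen k (by omega)) (hlen (k + g.length / 2) (by omega))]
      · rw [if_neg hk, if_neg hk]
        by_cases hk2 : g.length / 2 ≤ k ∧ k < g.length / 2 + g.length / 2
        · rw [if_pos hk2, List.getElem?_range (show k - g.length / 2 < g.length / 2 by omega)]
          have hkr : k < g.length := by omega
          rw [List.getElem?_eq_getElem hkr]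
          simp only [Option.map_some]
          have hgk : g[k] = g.getD k [] := (List.getD_eq_getElem g [] hkr).symm
          have hke : k - g.length / 2 + g.length / 2 = k := by omega
          have hbot := pvRowFold_bot g (g.length / 2) ((g.headD []).length / 2)
              (k - g.length / 2)
              (hlen (k - g.length / 2) (by omega)) (by rw [hke]; exact hlen k (by omega))
          rw [hke] at hbot
          rw [hgk, hbot]
        · rw [if_neg hk2,
              List.getElem?_eq_none (show (List.range (g.length / 2)).length ≤ k - g.length / 2 by
                simp only [List.length_range]; omega),
              List.getElem?_eq_none (show g.length ≤ k by omega)]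
          rfl
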